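-- pv_equiv track=rewrite | github.com/QuestionableAntics/coq_nvim | coq/shared/trans.py | reverse_acc
-- ===== SOURCE A (Python) =====
-- from typing import AbstractSet, Iterable, Iterator
--
-- def reverse_acc(replace_prefix_threshold: int, seq: str) -> Iterator[str]:
--     def cont() -> Iterator[str]:
--         yield seq
--         for i in range(1, len(seq)):
--             yield seq[:-i]
--
--     for sub in cont():
--         if sub and len(sub) >= replace_prefix_threshold:
--             yield sub
-- ===== SOURCE B (Python) =====
-- def reverse_acc(replace_prefix_threshold: int, seq: str):
--     lo = max(1, replace_prefix_threshold)
--     out = []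
--     prefix = ""
--     for i, ch in enumerate(seq, 1):
--         prefix += ch
--         if i >= lo:
--             out.append(prefix)
--     yield from reversed(out)
-- ===== Notes on version B (the rewrite author's own statement) =====
-- stated objective: alternative
-- what changed: B replaces A's descending generator of all prefixes plus a truthiness/length filter with a single ascending pass that grows the prefix one character at a time with an accumulator, appends it once the index reaches max(1, threshold), and finally yields the collected list reversed.
import Mathlib
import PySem

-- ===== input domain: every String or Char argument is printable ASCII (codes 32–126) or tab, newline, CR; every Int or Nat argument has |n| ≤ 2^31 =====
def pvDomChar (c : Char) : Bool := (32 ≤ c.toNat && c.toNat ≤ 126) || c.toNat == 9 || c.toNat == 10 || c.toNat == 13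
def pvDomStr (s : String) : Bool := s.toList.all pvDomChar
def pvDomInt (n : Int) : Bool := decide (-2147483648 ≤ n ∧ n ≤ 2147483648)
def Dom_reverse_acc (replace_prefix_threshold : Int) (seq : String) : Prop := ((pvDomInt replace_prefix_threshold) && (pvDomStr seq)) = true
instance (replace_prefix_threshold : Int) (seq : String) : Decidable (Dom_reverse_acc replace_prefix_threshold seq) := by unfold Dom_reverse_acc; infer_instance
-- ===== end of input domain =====

-- B replaces A's descending generate-then-filter with one ascending pass that grows the
-- prefix one character at a time, collecting it once the threshold is reached, then
-- reverses the collected list; objective: alternative (incremental build vs repeated slicing).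

-- ===== PORT A =====
-- literal transliteration: cont() yields seq then seq[:-i] for i in 1..len(seq)-1;
-- the outer loop filters by 'sub and len(sub) >= replace_prefix_threshold'.
def reverse_acc (replace_prefix_threshold : Int) (seq : String) : List String :=
  let cont : List String :=
    seq :: (PySem.List.pyRange 1 (PySem.Str.len seq) 1).map
      (fun i => PySem.Str.slice seq none (some (-i)))
  cont.foldl (fun acc sub =>
    if (decide (sub ≠ "") && decide (replace_prefix_threshold ≤ PySem.Str.len sub)) = true
    then acc ++ [sub] else acc) []

-- ===== PORT B =====
-- transliteration of Source B: for i, ch in enumerate(seq, 1): prefix += ch;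
-- if i >= lo: out.append(prefix); finally yield from reversed(out).
def reverse_acc_alt (replace_prefix_threshold : Int) (seq : String) : List String :=
  let lo : Int := max 1 replace_prefix_threshold
  let st := (PySem.List.enumerate seq.toList 1).foldl
    (fun (st : List Char × List String) p =>
      let pre := st.1 ++ [p.2]
      if lo ≤ p.1 then (pre, st.2 ++ [String.ofList pre]) else (pre, st.2))
    ([], [])
  st.2.reverse

-- ===== PRECONDITION & SPEC =====
def Spec_reverse_acc (replace_prefix_threshold : Int) (seq : String) (out : List String) : Prop := out = reverse_acc_alt replace_prefix_threshold seq
instance (replace_prefix_threshold : Int) (seq : String) (out : List String) : Decidable (Spec_reverse_acc replace_prefix_threshold seq out) := by unfold Spec_reverse_acc; infer_instance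

-- ===== CLAIM (what is proved, stated in full; the proofs are below) =====
def Claim_equal_reverse_acc : Prop := ∀ (replace_prefix_threshold : Int) (seq : String), Dom_reverse_acc replace_prefix_threshold seq → Spec_reverse_acc replace_prefix_threshold seq (reverse_acc replace_prefix_threshold seq)

-- ===== LEMMAS AND PROOFS =====

-- filtering a countdown to 0 by (lo ≤ ·) just raises the lower bound to lo-1
theorem pv_filt_countdown (lo : Int) (hlo : 1 ≤ lo) :
    ∀ (k : Nat) (a : Int), a ≤ (k : Int) →
      (PySem.List.pyRange a 0 (-1)).filter (fun n => decide (lo ≤ n))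
        = PySem.List.pyRange a (lo - 1) (-1) := by
  intro k
  induction k with
  | zero =>
    intro a ha
    rw [PySem.List.pyRange_neg_one_eq_nil (by exact_mod_cast ha),
        PySem.List.pyRange_neg_one_eq_nil (by omega)]
    rfl
  | succ k ih =>
    intro a ha
    by_cases h0 : a ≤ 0
    · rw [PySem.List.pyRange_neg_one_eq_nil h0,
          PySem.List.pyRange_neg_one_eq_nil (by omega)]
      rfl
    · rw [Int.not_le] at h0
      rw [PySem.List.pyRange_neg_one_cons h0, List.filter_cons]
      by_cases hla : lo ≤ a
      · simp only [hla, decide_true, if_true]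
        rw [PySem.List.pyRange_neg_one_cons (show lo - 1 < a by omega),
            ih (a - 1) (by omega)]
      · simp only [hla, decide_false, if_false, Bool.false_eq_true]
        rw [ih (a - 1) (by omega),
            PySem.List.pyRange_neg_one_eq_nil (show a - 1 ≤ lo - 1 by omega),
            PySem.List.pyRange_neg_one_eq_nil (show a ≤ lo - 1 by omega)]

-- A's cont() list is exactly the prefixes, by descending length L..1 (L ≥ 1)
theorem pv_cont_eq (seq : String) (hL : 1 ≤ (seq.toList.length : Int)) :
    seq :: (PySem.List.pyRange 1 (PySem.Str.len seq) 1).map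
        (fun i => PySem.Str.slice seq none (some (-i)))
      = (PySem.List.pyRange (PySem.Str.len seq) 0 (-1)).map
        (fun n => PySem.Str.slice seq none (some n)) := by
  rw [PySem.Str.len_eq,
      PySem.List.pyRange_neg_one_cons (show (0:Int) < (seq.toList.length : Int) by omega)]
  congr 1
  · simp only [PySem.Str.slice, PySem.Chars.slice]
    rw [PySem.List.slice_to seq.toList (show (0:Int) ≤ (seq.toList.length : Int) by omega),
        Int.toNat_natCast, List.take_length]
    simp
  · rw [PySem.List.pyRange_one, PySem.List.pyRange_neg_one, List.map_map, List.map_map]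
    have hlen : ((seq.toList.length : Int) - 1 - 0).toNat
        = ((seq.toList.length : Int) - 1).toNat := by omega
    rw [hlen]
    apply List.map_congr_left
    intro k hk
    simp only [List.mem_range] at hk
    have hcast : (((seq.toList.length : Int) - 1).toNat : Int) = (seq.toList.length : Int) - 1 := by
      omega
    have hk' : (k : Int) < (seq.toList.length : Int) - 1 := by omega
    simp only [Function.comp]
    have h1 : (-(1 + (k : Int))) = (-(((1 + k : Nat)) : Int)) := by push_cast; omega
    simp only [PySem.Str.slice, PySem.Chars.slice]
    rw [h1, PySem.List.slice_to_neg_natCast seq.toList (1 + k) (by omega),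
        PySem.List.slice_to seq.toList (show (0:Int) ≤ (seq.toList.length : Int) - 1 - k by omega)]
    have h2 : ((seq.toList.length : Int) - 1 - (k : Int)).toNat = seq.toList.length - (1 + k) := by
      omega
    rw [h2]

-- the filter predicate, evaluated on the prefix of length n (0 < n <= L), is lo <= n
theorem pv_pred_eq (t : Int) (seq : String) (n : Int)
    (hn : 0 < n) (hnL : n ≤ (seq.toList.length : Int)) :
    (decide (PySem.Str.slice seq none (some n) ≠ "")
      && decide (t ≤ PySem.Str.len (PySem.Str.slice seq none (some n))))
      = decide (max 1 t ≤ n) := by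
  have hs : PySem.Str.slice seq none (some n)
      = String.ofList (seq.toList.take n.toNat) := by
    simp [PySem.Str.slice, PySem.Chars.slice, PySem.List.slice_to seq.toList (le_of_lt hn)]
  have hlen : (seq.toList.take n.toNat).length = n.toNat := by
    rw [List.length_take]; omega
  rw [hs, ← Bool.decide_and, decide_eq_decide]
  constructor
  · rintro ⟨_, h2⟩
    rw [PySem.Str.len_eq] at h2
    simp only [String.toList_ofList, hlen] at h2
    omega
  · intro h
    refine ⟨?_, ?_⟩
    · intro hc
      have h0 := congrArg (fun s => s.toList.length) hc
      simp only [String.toList_ofList, hlen] at h0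
      simp at h0
      omega
    · rw [PySem.Str.len_eq]
      simp only [String.toList_ofList, hlen]
      omega

-- A equals the descending map of prefixes over pyRange L (lo-1) (-1)
theorem pv_A_eq (t : Int) (seq : String) :
    reverse_acc t seq
      = (PySem.List.pyRange (seq.toList.length : Int) (max 1 t - 1) (-1)).map
          (fun n => PySem.Str.slice seq none (some n)) := by
  unfold reverse_acc
  rw [show (fun (acc : List String) sub =>
        if (decide (sub ≠ "") && decide (t ≤ PySem.Str.len sub)) = true
        then acc ++ [sub] else acc)
      = (fun acc x =>
        if (fun sub => decide (sub ≠ "") && decide (t ≤ PySem.Str.len sub)) x = true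
        then acc ++ [id x] else acc) from rfl,
      PySem.List.foldl_append_if]
  simp only [List.map_id, List.nil_append]
  by_cases hL : 1 ≤ (seq.toList.length : Int)
  · have hc := pv_cont_eq seq hL
    rw [PySem.Str.len_eq] at hc ⊢
    rw [hc, List.filter_map]
    rw [List.filter_congr (l := PySem.List.pyRange (seq.toList.length : Int) 0 (-1))
        (q := fun n => decide (max 1 t ≤ n)) ?_]
    · rw [pv_filt_countdown (max 1 t) (by omega) seq.toList.length
          (seq.toList.length : Int) (by omega)]
    · intro n hn
      rw [PySem.List.mem_pyRange_neg_one] at hn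
      exact pv_pred_eq t seq n hn.1 hn.2
  · have hnil : seq.toList = [] := List.length_eq_zero_iff.mp (by omega)
    have hseq : seq = "" := by
      have h := congrArg String.ofList hnil
      simpa using h
    subst hseq
    rw [show PySem.Str.len "" = 0 from rfl,
        show ((("" : String).toList.length : Int)) = 0 from rfl]
    rw [PySem.List.pyRange_one_eq_nil (by omega),
        PySem.List.pyRange_neg_one_eq_nil (by omega)]
    simp

-- B's fold collects, in ascending order, the prefixes whose length passes lo
theorem pv_fold_out (lo : Int) :
    ∀ (cs : List Char) (s : Int) (p : List Char) (out : List String),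
      ((PySem.List.enumerate cs s).foldl
        (fun (st : List Char × List String) q =>
          let pre := st.1 ++ [q.2]
          if lo ≤ q.1 then (pre, st.2 ++ [String.ofList pre]) else (pre, st.2))
        (p, out)).2
      = out ++ (List.range cs.length).filterMap
          (fun (j : Nat) => if lo ≤ s + (j : Int)
                    then some (String.ofList (p ++ cs.take (j+1))) else none) := by
  intro cs
  induction cs with
  | nil => intro s p out; simp [PySem.List.enumerate_nil]
  | cons c cs ih =>
    intro s p out
    rw [PySem.List.enumerate_cons, List.foldl_cons]
    simp only []
    have hstep : (if lo ≤ s then (p ++ [c], out ++ [String.ofList (p ++ [c])])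
                  else (p ++ [c], out))
        = ((p ++ [c]), out ++ (if lo ≤ s then [String.ofList (p ++ [c])] else [])) := by
      split_ifs <;> simp
    rw [hstep, ih (s+1) (p ++ [c]) _]
    simp only [List.length_cons]
    rw [List.range_succ_eq_map, List.filterMap_cons, List.filterMap_map]
    have hzero : (if lo ≤ s + ((0:Nat) : Int)
        then some (String.ofList (p ++ (c :: cs).take (0+1))) else none)
        = (if lo ≤ s then some (String.ofList (p ++ [c])) else none) := by
      norm_num
    rw [hzero]
    have hfun : ((fun (j : Nat) => if lo ≤ s + (j : Int)
          then some (String.ofList (p ++ (c :: cs).take (j+1))) else none) ∘ Nat.succ)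
        = (fun (j : Nat) => if lo ≤ s + 1 + (j : Int)
          then some (String.ofList ((p ++ [c]) ++ cs.take (j+1))) else none) := by
      funext j
      simp only [Function.comp, Nat.succ_eq_add_one, List.take_succ_cons]
      have h1 : s + ((j + 1 : Nat) : Int) = s + 1 + (j : Int) := by push_cast; ring
      rw [h1]
      congr 1
      simp
    rw [hfun]
    split_ifs with h <;> simp [List.append_assoc]

-- reversing the ascending filtered prefixes gives the descending pyRange map
theorem pv_asc_desc (lo : Int) (hlo : 1 ≤ lo) (f : Int → String) :
    ∀ L : Nat,
      ((List.range L).filterMap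
        (fun (j : Nat) => if lo ≤ 1 + (j : Int) then some (f ((j : Int) + 1)) else none)).reverse
      = (PySem.List.pyRange (L : Int) (lo - 1) (-1)).map f := by
  intro L
  induction L with
  | zero =>
    rw [PySem.List.pyRange_neg_one_eq_nil (by omega)]
    simp
  | succ L ih =>
    rw [List.range_succ, List.filterMap_append, List.reverse_append, ih]
    by_cases h : lo ≤ (L : Int) + 1
    · rw [PySem.List.pyRange_neg_one_cons (show lo - 1 < ((L+1 : Nat) : Int) by push_cast; omega)]
      have hone : (List.filterMap
          (fun (j : Nat) => if lo ≤ 1 + (j : Int) then some (f ((j : Int) + 1)) else none) [L])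
          = [f ((L : Int) + 1)] := by
        simp only [List.filterMap_cons, List.filterMap_nil]
        rw [if_pos (by omega)]
      rw [hone]
      have hc : ((L+1 : Nat) : Int) = (L : Int) + 1 := by push_cast; ring
      have hc2 : ((L+1 : Nat) : Int) - 1 = (L : Int) := by push_cast; ring
      rw [List.map_cons, hc, show (L : Int) + 1 - 1 = (L : Int) by ring]
      simp
    · have hone : (List.filterMap
          (fun (j : Nat) => if lo ≤ 1 + (j : Int) then some (f ((j : Int) + 1)) else none) [L])
          = [] := by
        simp only [List.filterMap_cons, List.filterMap_nil]
        rw [if_neg (by omega)]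
      rw [hone, PySem.List.pyRange_neg_one_eq_nil (by omega),
          PySem.List.pyRange_neg_one_eq_nil (by push_cast; omega)]
      simp

-- B equals the same descending map
theorem pv_B_eq (t : Int) (seq : String) :
    reverse_acc_alt t seq
      = (PySem.List.pyRange (seq.toList.length : Int) (max 1 t - 1) (-1)).map
          (fun n => PySem.Str.slice seq none (some n)) := by
  unfold reverse_acc_alt
  simp only []
  rw [pv_fold_out (max 1 t) seq.toList 1 [] []]
  simp only [List.nil_append]
  have hfun : (fun (j : Nat) => if max 1 t ≤ 1 + (j : Int)
        then some (String.ofList (seq.toList.take (j+1))) else none)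
      = (fun (j : Nat) => if max 1 t ≤ 1 + (j : Int)
        then some (PySem.Str.slice seq none (some ((j : Int) + 1))) else none) := by
    funext j
    by_cases h : max 1 t ≤ 1 + (j : Int)
    · rw [if_pos h, if_pos h]
      simp only [PySem.Str.slice, PySem.Chars.slice]
      rw [PySem.List.slice_to seq.toList (show (0:Int) ≤ (j : Int) + 1 by omega),
          show ((j : Int) + 1).toNat = j + 1 by omega]
    · rw [if_neg h, if_neg h]
  rw [hfun]
  exact pv_asc_desc (max 1 t) (by omega) (fun n => PySem.Str.slice seq none (some n))
    seq.toList.length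

-- ===== VERDICT (by name: the statement is the Claim_ definition above) =====
theorem reverse_acc_spec : Claim_equal_reverse_acc := by
  intro t seq _
  unfold Spec_reverse_acc
  rw [pv_A_eq t seq, pv_B_eq t seq]
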